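-- pv_equiv track=rewrite | github.com/MerlinvdW/ESDAR-Checker | helper.py | cleanup_domains_list
-- ===== SOURCE A (Python) =====
-- from typing import List
--
-- def cleanup_domains_list(domains: List[str]) -> List[str]:
--     """
--     Clean up and deduplicate domain list.
--
--     Args:
--         domains: List of domain strings
--
--     Returns:
--         Cleaned, deduplicated, and sorted list of domains
--     """
--     if not domains:
--         return []
--
--     # Remove whitespace, convert to lowercase, and filter empty strings
--     cleaned = [d.strip().lower() for d in domains if d.strip()]
--
--     # Remove duplicates while preserving order
--     seen = set()
--     unique_domains = []
--     for domain in cleaned: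
--         if domain not in seen:
--             seen.add(domain)
--             unique_domains.append(domain)
--
--     # Sort alphabetically
--     unique_domains.sort()
--
--     return unique_domains
-- ===== SOURCE B (Python) =====
-- from typing import List
--
-- def cleanup_domains_list(domains: List[str]) -> List[str]:
--     """Clean, sort, then dedupe by a single adjacency scan (no hash set)."""
--     cleaned = sorted(d.strip().lower() for d in domains if d.strip())
--     out: List[str] = []
--     for d in cleaned:
--         if not out or out[-1] != d:
--             out.append(d)
--     return out
-- ===== Notes on version B (the rewrite author's own statement) =====
-- stated objective: simpler
-- what changed: B drops the hash 'seen' set and the separate dedup pass: it sorts the cleaned list first and removes duplicates with one adjacency scan, relying on the sort to make duplicates adjacent.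
import Mathlib
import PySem

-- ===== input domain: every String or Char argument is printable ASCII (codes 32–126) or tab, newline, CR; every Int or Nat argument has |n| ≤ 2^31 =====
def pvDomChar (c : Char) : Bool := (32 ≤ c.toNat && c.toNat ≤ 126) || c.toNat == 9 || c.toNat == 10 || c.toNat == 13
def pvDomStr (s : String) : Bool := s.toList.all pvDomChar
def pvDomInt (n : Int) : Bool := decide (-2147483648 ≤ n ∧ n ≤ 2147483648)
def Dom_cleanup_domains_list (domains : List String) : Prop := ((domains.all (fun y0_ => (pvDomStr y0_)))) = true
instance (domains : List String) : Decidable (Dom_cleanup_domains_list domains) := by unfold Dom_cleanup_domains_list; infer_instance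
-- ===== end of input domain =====

-- B replaces A's hash-set dedup pass by sort-then-adjacency-scan; same return value, no speed claim.

-- ===== PORT A =====
def cleanup_domains_list (domains : List String) : List String :=
  if domains = [] then []
  else
    let cleaned := (domains.filter (fun d => decide (PySem.Str.strip d ≠ ""))).map
      (fun d => PySem.Str.lower (PySem.Str.strip d))
    let p := cleaned.foldl
      (fun (su : PySem.Set String × List String) d =>
        if PySem.Set.contains su.1 d then su else (PySem.Set.add su.1 d, su.2 ++ [d]))
      (PySem.Set.empty, [])
    PySem.List.sorted p.2 (fun x => x) false

-- ===== PORT B =====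
def cleanup_domains_list_alt (domains : List String) : List String :=
  let cleaned := PySem.List.sorted
    ((domains.filter (fun d => decide (PySem.Str.strip d ≠ ""))).map
      (fun d => PySem.Str.lower (PySem.Str.strip d)))
    (fun x => x) false
  cleaned.foldl (fun out d => if out = [] ∨ out.getLast? ≠ some d then out ++ [d] else out) []

-- ===== PRECONDITION & SPEC =====
def Spec_cleanup_domains_list (domains : List String) (out : List String) : Prop := out = cleanup_domains_list_alt domains
instance (domains : List String) (out : List String) : Decidable (Spec_cleanup_domains_list domains out) := by unfold Spec_cleanup_domains_list; infer_instance

-- ===== CLAIM (what is proved, stated in full; the proofs are below) =====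
def Claim_equal_cleanup_domains_list : Prop := ∀ (domains : List String), Dom_cleanup_domains_list domains → Spec_cleanup_domains_list domains (cleanup_domains_list domains)

-- ===== LEMMAS AND PROOFS =====

-- adjacency dedup (the mathematical shape of B's scan)
def dedupAdj : List String → List String
  | [] => []
  | [x] => [x]
  | x :: y :: t => if x = y then dedupAdj (y :: t) else x :: dedupAdj (y :: t)

theorem mem_dedupAdj (x : String) : ∀ (l : List String), x ∈ dedupAdj l ↔ x ∈ l
  | [] => Iff.rfl
  | [_] => Iff.rfl
  | a :: b :: t => by
    by_cases h : a = b
    · subst h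
      have e : dedupAdj (a :: a :: t) = dedupAdj (a :: t) := by simp [dedupAdj]
      rw [e, mem_dedupAdj x (a :: t)]
      simp only [List.mem_cons]
      tauto
    · simp only [dedupAdj, if_neg h, List.mem_cons, mem_dedupAdj x (b :: t)]

theorem pairwise_lt_dedupAdj : ∀ (l : List String), l.Pairwise (· ≤ ·) → (dedupAdj l).Pairwise (· < ·)
  | [] , _ => List.Pairwise.nil
  | [x], _ => by simp [dedupAdj]
  | a :: b :: t, h => by
    rcases List.pairwise_cons.mp h with ⟨ha, hbt⟩
    by_cases hab : a = b
    · simpa [dedupAdj, hab] using pairwise_lt_dedupAdj (b :: t) hbt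
    · simp only [dedupAdj, if_neg hab]
      refine List.pairwise_cons.mpr ⟨?_, pairwise_lt_dedupAdj (b :: t) hbt⟩
      intro z hz
      have hzmem : z ∈ b :: t := (mem_dedupAdj z (b :: t)).mp hz
      rcases List.mem_cons.mp hzmem with rfl | hzt
      · exact lt_of_le_of_ne (ha z (by simp)) hab
      · have hbz : b ≤ z := (List.pairwise_cons.mp hbt).1 z hzt
        exact lt_of_lt_of_le (lt_of_le_of_ne (ha b (by simp)) hab) hbz

-- B's scan computes dedupAdj
theorem foldl_scan_eq (l : List String) : ∀ (acc : List String) (a : String),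
    l.foldl (fun out d => if out = [] ∨ out.getLast? ≠ some d then out ++ [d] else out) (acc ++ [a])
      = acc ++ dedupAdj (a :: l) := by
  induction l with
  | nil => intro acc a; simp [dedupAdj]
  | cons b t ih =>
    intro acc a
    by_cases hab : a = b
    · subst hab
      simp only [List.foldl_cons]
      rw [if_neg (by simp)]
      simpa [dedupAdj] using ih acc a
    · simp only [List.foldl_cons]
      rw [if_pos (by simp [hab])]
      have := ih (acc ++ [a]) b
      simp only [List.append_assoc] at this
      simpa [dedupAdj, hab] using this

theorem scan_eq_dedupAdj (l : List String) :
    l.foldl (fun out d => if out = [] ∨ out.getLast? ≠ some d then out ++ [d] else out) []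
      = dedupAdj l := by
  cases l with
  | nil => rfl
  | cons a t =>
    have h := foldl_scan_eq t ([] : List String) a
    simpa using h

-- A's seen/unique loop: both accumulators stay equal and compute the running set
theorem foldl_seen_unique (c : List String) : ∀ (s : PySem.Set String),
    c.foldl
      (fun (su : PySem.Set String × List String) d =>
        if PySem.Set.contains su.1 d then su else (PySem.Set.add su.1 d, su.2 ++ [d]))
      (s, s)
    = (c.foldl PySem.Set.add s, c.foldl PySem.Set.add s) := by
  induction c with
  | nil => intro s; rfl
  | cons d t ih =>
    intro s
    simp only [List.foldl_cons]
    have hstep : (if PySem.Set.contains (s, s).1 d then (s, s)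
          else (PySem.Set.add (s, s).1 d, (s, s).2 ++ [d]))
        = ((PySem.Set.add s d, PySem.Set.add s d) : PySem.Set String × List String) := by
      by_cases h : PySem.Set.contains s d
      · simp only [h, if_true]
        simp only [PySem.Set.add, h, if_true]
      · simp only [h, Bool.false_eq_true, if_false]
        simp only [PySem.Set.add, h, Bool.false_eq_true, if_false]
    rw [hstep]
    exact ih (PySem.Set.add s d)

-- ===== VERDICT (by name: the statement is the Claim_ definition above) =====
theorem cleanup_domains_list_spec : Claim_equal_cleanup_domains_list := by
  intro domains _
  unfold Spec_cleanup_domains_list cleanup_domains_list cleanup_domains_list_alt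
  by_cases hd : domains = []
  · subst hd; rfl
  · simp only [hd, if_false]
    set c := (domains.filter (fun d => decide (PySem.Str.strip d ≠ ""))).map
      (fun d => PySem.Str.lower (PySem.Str.strip d)) with hc
    have hinit : ((PySem.Set.empty, ([] : List String)) : PySem.Set String × List String)
        = (PySem.Set.empty, PySem.Set.empty) := rfl
    rw [hinit, foldl_seen_unique c PySem.Set.empty, scan_eq_dedupAdj]
    have hofl : c.foldl PySem.Set.add PySem.Set.empty = PySem.Set.ofList c := by
      rw [PySem.Set.ofList_eq_foldl]
      rfl
    rw [hofl]
    have hsorted_le : (PySem.List.sorted c (fun x => x) false).Pairwise (· ≤ ·) := by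
      simpa using PySem.List.sorted_pairwise c (fun x => x)
    have hlt := pairwise_lt_dedupAdj _ hsorted_le
    have hnd1 : (dedupAdj (PySem.List.sorted c (fun x => x) false)).Nodup :=
      hlt.imp (fun h => ne_of_lt h)
    have hperm : (dedupAdj (PySem.List.sorted c (fun x => x) false)).Perm (PySem.Set.ofList c) := by
      rw [List.perm_ext_iff_of_nodup hnd1 (PySem.Set.nodup_ofList c)]
      intro a
      rw [mem_dedupAdj, PySem.Set.mem_ofList]
      exact (PySem.List.sorted_perm c (fun x => x) false).mem_iff
    exact PySem.List.sorted_eq_of_perm_of_pairwise_lt _ _ (fun x => x) hperm hlt
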